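-- pv_equiv track=rewrite | github.com/yash921/leetcode-questions | Educative.io/3. Pattern Two Pointers/ComparingStringsContainingBackspaces .py | ComparingStringsContainingBackspaces
-- ===== SOURCE A (Python) =====
-- def ComparingStringsContainingBackspaces(str1, str2):
--
--     index1 = len(str1) - 1
--     index2 = len(str2) - 1
--     while index1 >= 0 or index2 >= 0:
--         i1 = get_next_valid_char_index(str1, index1) # "xy#z"
--         i2 = get_next_valid_char_index(str2, index2) # "xzz#"
--
--         if i1 < 0 and i2 < 0:
--             return True
--         if i1 < 0 or i2 < 0:
--             return False
--         if str1[i1] != str2[i2]: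
--             return False
--
--         index1 = i1 - 1
--         index2 = i2 - 1
--     return True
--
-- def get_next_valid_char_index(string, index):
--     backspace_count = 0
--     while index >= 0:
--         if string[index] == '#':
--             backspace_count += 1
--         elif backspace_count > 0:
--             backspace_count -= 1
--         else:
--             break
--
--         index -= 1
--     return index
-- ===== SOURCE B (Python) =====
-- def ComparingStringsContainingBackspaces(str1, str2):
--     def build(s):
--         st = []
--         for c in s:
--             if c == '#':
--                 st = st[:-1]
--             else:
--                 st.append(c)
--         return st
--     return build(str1) == build(str2)
-- ===== Notes on version B (the rewrite author's own statement) =====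
-- stated objective: simpler
-- what changed: Replaces A's backward two-pointer scan with a skip-counting helper by a single forward pass per string that builds the effective string on a stack and compares the two stacks.
import Mathlib
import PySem

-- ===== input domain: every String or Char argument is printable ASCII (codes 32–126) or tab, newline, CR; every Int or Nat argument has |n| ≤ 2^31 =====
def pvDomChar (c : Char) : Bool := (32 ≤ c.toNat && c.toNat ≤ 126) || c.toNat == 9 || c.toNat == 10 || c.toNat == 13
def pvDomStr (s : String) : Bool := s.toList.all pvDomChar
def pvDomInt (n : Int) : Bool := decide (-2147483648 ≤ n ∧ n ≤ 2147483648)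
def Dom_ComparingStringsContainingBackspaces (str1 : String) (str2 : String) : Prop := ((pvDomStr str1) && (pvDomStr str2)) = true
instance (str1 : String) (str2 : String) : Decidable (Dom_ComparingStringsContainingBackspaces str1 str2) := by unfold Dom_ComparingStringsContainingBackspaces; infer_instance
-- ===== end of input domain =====

-- B replaces A's backward two-pointer scan by a forward stack build of each effective string; objective: simpler.

-- ===== PORT A =====
-- get_next_valid_char_index: backward scan counting backspaces (indexing is always in
-- range when index < length, as holds at every call site; getD's default is unreachable there)
def gnvA (l : List Char) (index : Int) (b : Int) : Int :=
  if index ≥ 0 then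
    if l.getD index.toNat ' ' = '#' then gnvA l (index - 1) (b + 1)
    else if b > 0 then gnvA l (index - 1) (b - 1)
    else index
  else index
termination_by (index + 1).toNat

theorem gnvA_le (l : List Char) (index : Int) (b : Int) : gnvA l index b ≤ index := by
  fun_induction gnvA l index b <;> omega

-- main while-loop of A
def loopA (l1 l2 : List Char) (i1 i2 : Int) : Bool :=
  if i1 ≥ 0 ∨ i2 ≥ 0 then
    let j1 := gnvA l1 i1 0
    let j2 := gnvA l2 i2 0
    if j1 < 0 ∧ j2 < 0 then true
    else if j1 < 0 ∨ j2 < 0 then false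
    else if l1.getD j1.toNat ' ' ≠ l2.getD j2.toNat ' ' then false
    else loopA l1 l2 (j1 - 1) (j2 - 1)
  else true
termination_by (i1 + 1).toNat + (i2 + 1).toNat
decreasing_by
  have h1 := gnvA_le l1 i1 0
  have h2 := gnvA_le l2 i2 0
  omega

def ComparingStringsContainingBackspaces (str1 : String) (str2 : String) : Bool :=
  loopA str1.toList str2.toList (str1.toList.length - 1) (str2.toList.length - 1)

-- ===== PORT B =====
-- build(s): forward pass pushing chars, '#' drops the last pushed char (no-op on empty)
def buildEff (l : List Char) : List Char :=
  l.foldl (fun st c => if c = '#' then st.dropLast else st ++ [c]) []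

def ComparingStringsContainingBackspaces_alt (str1 : String) (str2 : String) : Bool :=
  buildEff str1.toList == buildEff str2.toList

-- ===== PRECONDITION & SPEC =====
def Spec_ComparingStringsContainingBackspaces (str1 : String) (str2 : String) (out : Bool) : Prop := out = ComparingStringsContainingBackspaces_alt str1 str2
instance (str1 : String) (str2 : String) (out : Bool) : Decidable (Spec_ComparingStringsContainingBackspaces str1 str2 out) := by unfold Spec_ComparingStringsContainingBackspaces; infer_instance

-- ===== CLAIM (what is proved, stated in full; the proofs are below) =====
def Claim_equal_ComparingStringsContainingBackspaces : Prop := ∀ (str1 : String) (str2 : String), Dom_ComparingStringsContainingBackspaces str1 str2 → Spec_ComparingStringsContainingBackspaces str1 str2 (ComparingStringsContainingBackspaces str1 str2)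

-- ===== LEMMAS AND PROOFS =====

-- effective string of a prefix, foldl step
def effPre (l : List Char) (n : Nat) : List Char := buildEff (l.take n)

theorem effPre_succ (l : List Char) (n : Nat) (h : n < l.length) :
    effPre l (n + 1) =
      (if l.getD n ' ' = '#' then (effPre l n).dropLast else effPre l n ++ [l.getD n ' ']) := by
  have : l.take (n + 1) = l.take n ++ [l[n]] := List.take_succ_eq_append_getElem h
  simp only [effPre, buildEff, this, List.foldl_append, List.foldl_cons, List.foldl_nil,
    List.getD_eq_getElem l ' ' h]

-- drop the b pending backspaces from the end
def popN (xs : List Char) (b : Nat) : List Char := xs.take (xs.length - b)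

theorem popN_append_succ (xs : List Char) (c : Char) (k : Nat) :
    popN (xs ++ [c]) (k + 1) = popN xs k := by
  simp only [popN, List.length_append, List.length_cons, List.length_nil]
  rw [show xs.length + (0 + 1) - (k + 1) = xs.length - k by omega,
    List.take_append_of_le_length (by omega)]

theorem popN_dropLast (xs : List Char) (k : Nat) :
    popN xs.dropLast k = popN xs (k + 1) := by
  simp only [popN, List.dropLast_eq_take, List.length_take, List.take_take]
  congr 1
  omega

-- exact characterisation of gnvA: with b pending backspaces at index, the result is the
-- index of the last character of popN (effPre l (index+1)) b, or negative if that is empty.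
theorem gnvA_spec (l : List Char) (index : Int) (b : Int)
    (hb : 0 ≤ b) (hi : index < l.length) :
    (gnvA l index b < 0 ∧ popN (effPre l (index + 1).toNat) b.toNat = []) ∨
    (0 ≤ gnvA l index b ∧ gnvA l index b < l.length ∧
      popN (effPre l (index + 1).toNat) b.toNat =
        effPre l (gnvA l index b).toNat ++ [l.getD (gnvA l index b).toNat ' ']) := by
  fun_induction gnvA l index b with
  | case1 index b hge c ih =>
    -- l[index] = '#': pending count becomes b+1
    have h1 : index - 1 < (l.length : Int) := by omega
    have heq : effPre l (index + 1).toNat = (effPre l (index - 1 + 1).toNat).dropLast := by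
      have hn : (index + 1).toNat = index.toNat + 1 := by omega
      have hlt : index.toNat < l.length := by omega
      have heq2 : (index - 1 + 1).toNat = index.toNat := by omega
      rw [hn, heq2, effPre_succ l index.toNat hlt, if_pos c]
    have hpop : popN (effPre l (index + 1).toNat) b.toNat =
        popN (effPre l (index - 1 + 1).toNat) (b + 1).toNat := by
      rw [heq]
      have hb1 : (b + 1).toNat = b.toNat + 1 := by omega
      rw [popN_dropLast, hb1]
    rw [hpop]
    exact ih (by omega) h1
  | case2 index b hge c hbpos ih =>
    -- ordinary char with pending backspaces: it is consumed
    have h1 : index - 1 < (l.length : Int) := by omega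
    have hlt : index.toNat < l.length := by omega
    have heq : effPre l (index + 1).toNat = effPre l (index - 1 + 1).toNat ++ [l.getD index.toNat ' '] := by
      have hn : (index + 1).toNat = index.toNat + 1 := by omega
      have heq2 : (index - 1 + 1).toNat = index.toNat := by omega
      rw [hn, heq2, effPre_succ l index.toNat hlt, if_neg c]
    have hpop : popN (effPre l (index + 1).toNat) b.toNat =
        popN (effPre l (index - 1 + 1).toNat) (b - 1).toNat := by
      rw [heq]
      have hb1 : b.toNat = (b - 1).toNat + 1 := by omega
      rw [hb1, popN_append_succ]
    rw [hpop]
    exact ih (by omega) h1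
  | case3 index b hge c hble =>
    -- ordinary char, no pending backspace: found it
    right
    have hlt : index.toNat < l.length := by omega
    refine ⟨hge, hi, ?_⟩
    have hb0 : b.toNat = 0 := by omega
    have hn : (index + 1).toNat = index.toNat + 1 := by omega
    rw [hb0, hn, effPre_succ l index.toNat hlt, if_neg c]
    simp [popN]
  | case4 index b hneg =>
    left
    have hz : (index + 1).toNat = 0 := by omega
    refine ⟨by omega, ?_⟩
    rw [hz]
    simp [effPre, buildEff, popN]

theorem loopA_spec (l1 l2 : List Char) (i1 i2 : Int)
    (h1 : i1 < l1.length) (h2 : i2 < l2.length) :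
    loopA l1 l2 i1 i2 = (effPre l1 (i1 + 1).toNat == effPre l2 (i2 + 1).toNat) := by
  fun_induction loopA l1 l2 i1 i2 with
  | case1 i1 i2 hcond j1 j2 hneg =>
    -- both effective prefixes exhausted
    rcases gnvA_spec l1 i1 0 (by omega) h1 with ⟨_, he1⟩ | ⟨hp, _, _⟩
    · rcases gnvA_spec l2 i2 0 (by omega) h2 with ⟨_, he2⟩ | ⟨hp, _, _⟩
      · simp only [popN, Int.toNat_zero, Nat.sub_zero, List.take_length] at he1 he2
        rw [he1, he2]; rfl
      · omega
    · omega
  | case2 i1 i2 hcond j1 j2 hneg hone =>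
    -- exactly one side exhausted
    rcases gnvA_spec l1 i1 0 (by omega) h1 with ⟨hn1, he1⟩ | ⟨hp1, _, he1⟩ <;>
      rcases gnvA_spec l2 i2 0 (by omega) h2 with ⟨hn2, he2⟩ | ⟨hp2, _, he2⟩ <;>
      simp only [popN, Int.toNat_zero, Nat.sub_zero, List.take_length] at he1 he2
    · omega
    · rw [he1, he2]; simp
    · rw [he1, he2]; simp
    · omega
  | case3 i1 i2 hcond j1 j2 hneg hone hne =>
    -- last effective characters differ
    rcases gnvA_spec l1 i1 0 (by omega) h1 with ⟨hn1, he1⟩ | ⟨hp1, _, he1⟩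
    · omega
    rcases gnvA_spec l2 i2 0 (by omega) h2 with ⟨hn2, he2⟩ | ⟨hp2, _, he2⟩
    · omega
    simp only [popN, Int.toNat_zero, Nat.sub_zero, List.take_length] at he1 he2
    rw [he1, he2]
    symm
    rw [beq_eq_false_iff_ne]
    intro hcontra
    have hlast := (List.append_inj' hcontra rfl).2
    simp only [List.cons.injEq, and_true] at hlast
    exact hne hlast
  | case4 i1 i2 hcond j1 j2 hneg hone hne ih =>
    -- matching characters: peel them and recurse
    rcases gnvA_spec l1 i1 0 (by omega) h1 with ⟨hn1, he1⟩ | ⟨hp1, hlt1, he1⟩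
    · omega
    rcases gnvA_spec l2 i2 0 (by omega) h2 with ⟨hn2, he2⟩ | ⟨hp2, hlt2, he2⟩
    · omega
    simp only [popN, Int.toNat_zero, Nat.sub_zero, List.take_length] at he1 he2
    rw [not_not] at hne
    have hrec := ih (by omega) (by omega)
    have ht1 : (j1 - 1 + 1).toNat = j1.toNat := by omega
    have ht2 : (j2 - 1 + 1).toNat = j2.toNat := by omega
    rw [ht1, ht2] at hrec
    rw [hrec, he1, he2, hne]
    have key : ∀ (X Y : List Char) (c : Char), (X ++ [c] == Y ++ [c]) = (X == Y) := by
      intro X Y c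
      rcases eq_or_ne X Y with h | h
      · simp [h]
      · have h' : X ++ [c] ≠ Y ++ [c] := fun hc => h (List.append_inj_left' hc rfl)
        rw [beq_eq_false_iff_ne.mpr h, beq_eq_false_iff_ne.mpr h']
    rw [key]
  | case5 i1 i2 hcond =>
    -- loop never entered: both strings empty prefixes
    have e1 : (i1 + 1).toNat = 0 := by omega
    have e2 : (i2 + 1).toNat = 0 := by omega
    simp [e1, e2, effPre, buildEff]

-- ===== VERDICT (by name: the statement is the Claim_ definition above) =====
theorem ComparingStringsContainingBackspaces_spec : Claim_equal_ComparingStringsContainingBackspaces := by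
  intro str1 str2 _
  unfold Spec_ComparingStringsContainingBackspaces ComparingStringsContainingBackspaces
    ComparingStringsContainingBackspaces_alt
  have h := loopA_spec str1.toList str2.toList (str1.toList.length - 1) (str2.toList.length - 1)
    (by omega) (by omega)
  have e1 : ((str1.toList.length : Int) - 1 + 1).toNat = str1.toList.length := by omega
  have e2 : ((str2.toList.length : Int) - 1 + 1).toNat = str2.toList.length := by omega
  rw [h, e1, e2]
  simp only [effPre, List.take_length]
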